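-- pv_equiv track=rewrite | github.com/JonathanBechtel/draft-app | alembic/versions/0cdc5f018a72_create_positions_table.py | _tokenize_raw_position
-- ===== SOURCE A (Python) =====
-- from typing import List, Optional, Dict
--
-- _BASE_ORDER = ["PG", "SG", "SF", "PF", "C", "G", "F"]
--
-- _BASE_NORMALIZATION = {
--     "PG": "PG",
--     "POINT": "PG",
--     "POINTGUARD": "PG",
--     "SG": "SG",
--     "SHOOTING": "SG",
--     "SHOOTINGGUARD": "SG",
--     "SF": "SF",
--     "SMALL": "SF",
--     "SMALLFORWARD": "SF",
--     "PF": "PF",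
--     "POWER": "PF",
--     "POWERFORWARD": "PF",
--     "C": "C",
--     "CENTER": "C",
--     "G": "G",
--     "F": "F",
-- }
--
-- def _tokenize_raw_position(raw: str) -> List[str]:
--     cleaned = raw.replace("/", "-").replace(" ", "").upper()
--     tokens = [tok for tok in cleaned.split("-") if tok]
--     normalized: List[str] = []
--     for token in tokens:
--         canonical = _BASE_NORMALIZATION.get(token)
--         if canonical is None:
--             continue
--         normalized.append(canonical)
--     if not normalized:
--         return []
--     unique: List[str] = []
--     for token in normalized:
--         if token not in unique:
--             unique.append(token)
--     order_index = {code: idx for idx, code in enumerate(_BASE_ORDER)}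
--     unique.sort(key=lambda code: order_index.get(code, len(_BASE_ORDER)))
--     return unique
-- ===== SOURCE B (Python) =====
-- from typing import List
--
-- _BASE_ORDER = ["PG", "SG", "SF", "PF", "C", "G", "F"]
--
-- _BASE_NORMALIZATION = {
--     "PG": "PG",
--     "POINT": "PG",
--     "POINTGUARD": "PG",
--     "SG": "SG",
--     "SHOOTING": "SG",
--     "SHOOTINGGUARD": "SG",
--     "SF": "SF",
--     "SMALL": "SF",
--     "SMALLFORWARD": "SF",
--     "PF": "PF",
--     "POWER": "PF",
--     "POWERFORWARD": "PF",
--     "C": "C",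
--     "CENTER": "C",
--     "G": "G",
--     "F": "F",
-- }
--
-- def _tokenize_raw_position(raw: str) -> List[str]:
--     cleaned = raw.replace("/", "-").replace(" ", "").upper()
--     present = set()
--     for tok in cleaned.split("-"):
--         canonical = _BASE_NORMALIZATION.get(tok)
--         if canonical is not None:
--             present.add(canonical)
--     return [code for code in _BASE_ORDER if code in present]
-- ===== Notes on version B (the rewrite author's own statement) =====
-- stated objective: simpler
-- what changed: B collects the canonical codes found in the tokens into a set in one pass and then emits the fixed canonical order filtered by presence, eliminating A's empty-token filter, explicit order-preserving dedup loop, order-index dict and final key-based sort.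
import Mathlib
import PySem

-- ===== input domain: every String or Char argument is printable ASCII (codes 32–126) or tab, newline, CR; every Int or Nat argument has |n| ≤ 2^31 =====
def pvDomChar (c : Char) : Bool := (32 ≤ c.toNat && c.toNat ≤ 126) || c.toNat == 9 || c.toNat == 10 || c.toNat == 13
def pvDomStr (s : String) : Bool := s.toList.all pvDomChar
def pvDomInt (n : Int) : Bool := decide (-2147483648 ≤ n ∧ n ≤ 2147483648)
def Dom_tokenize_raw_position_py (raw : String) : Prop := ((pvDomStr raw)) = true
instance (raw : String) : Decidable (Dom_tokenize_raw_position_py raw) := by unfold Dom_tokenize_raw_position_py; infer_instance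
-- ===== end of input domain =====

-- B replaces A's empty-token filter, order-preserving dedup loop and key-based sort with one
-- set-building pass over the tokens followed by a presence filter over the fixed canonical order.

-- ===== PORT A =====
def pvBaseOrder : List String := ["PG", "SG", "SF", "PF", "C", "G", "F"]

def pvPairs : List (String × String) :=
    [("PG", "PG"), ("POINT", "PG"), ("POINTGUARD", "PG"),
     ("SG", "SG"), ("SHOOTING", "SG"), ("SHOOTINGGUARD", "SG"),
     ("SF", "SF"), ("SMALL", "SF"), ("SMALLFORWARD", "SF"),
     ("PF", "PF"), ("POWER", "PF"), ("POWERFORWARD", "PF"),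
     ("C", "C"), ("CENTER", "C"),
     ("G", "G"), ("F", "F")]

def pvBaseNormalization : PySem.Dict String String := PySem.Dict.ofList pvPairs

def tokenize_raw_position_py (raw : String) : List String :=
  let cleaned := PySem.Str.upper (PySem.Str.replace (PySem.Str.replace raw "/" "-") " " "")
  -- cleaned.split("-"): the separator "-" is a nonempty literal, so split? is always `some`
  let tokens := ((PySem.Str.split? cleaned "-").getD []).filter (fun tok => tok ≠ "")
  let normalized := tokens.foldl (fun acc token =>
    match pvBaseNormalization.get? token with
    | none => acc
    | some canonical => acc ++ [canonical]) []
  if normalized = [] then []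
  else
    let unique := normalized.foldl (fun u token => if u.contains token then u else u ++ [token]) []
    let orderIndex : PySem.Dict String Int :=
      (PySem.List.enumerate pvBaseOrder 0).foldl (fun d p => d.insert p.2 p.1) PySem.Dict.empty
    PySem.List.sorted unique (fun code => orderIndex.getD code (pvBaseOrder.length : Int)) false

-- ===== PORT B =====
def tokenize_raw_position_py_alt (raw : String) : List String :=
  let cleaned := PySem.Str.upper (PySem.Str.replace (PySem.Str.replace raw "/" "-") " " "")
  let present : PySem.Set String :=
    ((PySem.Str.split? cleaned "-").getD []).foldl (fun s tok =>
      match pvBaseNormalization.get? tok with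
      | none => s
      | some canonical => PySem.Set.add s canonical) PySem.Set.empty
  pvBaseOrder.filter (fun code => PySem.Set.contains present code)

-- ===== PRECONDITION & SPEC =====
def Spec_tokenize_raw_position_py (raw : String) (out : List String) : Prop := out = tokenize_raw_position_py_alt raw
instance (raw : String) (out : List String) : Decidable (Spec_tokenize_raw_position_py raw out) := by unfold Spec_tokenize_raw_position_py; infer_instance

-- ===== CLAIM (what is proved, stated in full; the proofs are below) =====
def Claim_equal_tokenize_raw_position_py : Prop := ∀ (raw : String), Dom_tokenize_raw_position_py raw → Spec_tokenize_raw_position_py raw (tokenize_raw_position_py raw)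

-- ===== LEMMAS AND PROOFS =====

-- the canonical codes extracted in order from a token list
def pvNorm (toks : List String) : List String := toks.filterMap pvBaseNormalization.get?

-- A's sort key
def pvKey (code : String) : Int :=
  PySem.Dict.getD
    ((PySem.List.enumerate pvBaseOrder 0).foldl (fun d p => d.insert p.2 p.1) PySem.Dict.empty)
    code (pvBaseOrder.length : Int)

lemma pvGet?_mk_values {t c : String} (ps : List (String × String))
    (h : (PySem.Dict.mk ps).get? t = some c) : c ∈ ps.map (·.2) := by
  induction ps with
  | nil => cases h
  | cons p rest ih =>
    rw [show PySem.Dict.mk (p :: rest) = PySem.Dict.mk ((p.1, p.2) :: rest) from rfl,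
      PySem.Dict.get?_mk_cons] at h
    by_cases hk : (p.1 == t) = true
    · rw [if_pos hk] at h
      injection h with h2
      simp [← h2]
    · rw [if_neg hk] at h
      simp [ih h]

lemma pvNorm_mem_order {toks : List String} {c : String} (hc : c ∈ pvNorm toks) :
    c ∈ pvBaseOrder := by
  obtain ⟨t, _, ht⟩ := List.mem_filterMap.mp hc
  rw [show pvBaseNormalization = PySem.Dict.mk pvPairs from by decide] at ht
  have h2 : ∀ x ∈ pvPairs.map (·.2), x ∈ pvBaseOrder := by decide
  exact h2 _ (pvGet?_mk_values pvPairs ht)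

lemma pvNorm_filter_empty (toks : List String) :
    pvNorm (toks.filter (fun tok => tok ≠ "")) = pvNorm toks := by
  induction toks with
  | nil => rfl
  | cons t ts ih =>
    by_cases h : t = ""
    · subst h
      simpa [pvNorm, List.filter_cons, (by decide : pvBaseNormalization.get? "" = none)] using ih
    · rw [List.filter_cons_of_pos (by simp [h])]
      simp only [pvNorm, List.filterMap_cons, decide_not] at ih ⊢
      cases hg : pvBaseNormalization.get? t <;> simp [ih]

lemma pvA_loop_eq_norm (toks : List String) (acc : List String) :
    toks.foldl (fun acc token =>
      match pvBaseNormalization.get? token with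
      | none => acc
      | some canonical => acc ++ [canonical]) acc = acc ++ pvNorm toks := by
  induction toks generalizing acc with
  | nil => simp [pvNorm]
  | cons t ts ih =>
    simp only [pvNorm, List.foldl_cons, List.filterMap_cons] at ih ⊢
    cases h : pvBaseNormalization.get? t <;> simp [ih]

lemma pvB_loop_eq_set (toks : List String) (s : PySem.Set String) :
    toks.foldl (fun s tok =>
      match pvBaseNormalization.get? tok with
      | none => s
      | some canonical => PySem.Set.add s canonical) s
      = (pvNorm toks).foldl PySem.Set.add s := by
  induction toks generalizing s with
  | nil => rfl
  | cons t ts ih =>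
    simp only [pvNorm, List.foldl_cons, List.filterMap_cons] at ih ⊢
    cases h : pvBaseNormalization.get? t <;> simp [ih]

lemma pvDedup_loop_eq (xs : List String) :
    xs.foldl (fun u token => if u.contains token then u else u ++ [token]) []
      = PySem.List.dedup xs := by
  rw [PySem.List.dedup_eq_ofList, PySem.Set.ofList_eq_foldl]
  rfl

lemma pvKey_pairwise : pvBaseOrder.Pairwise (fun a b => pvKey a < pvKey b) := by decide

lemma pvSorted_dedup_eq_filter (M : List String) (h : ∀ x ∈ M, x ∈ pvBaseOrder) :
    PySem.List.sorted (PySem.List.dedup M) pvKey false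
      = pvBaseOrder.filter (fun code => decide (code ∈ M)) := by
  apply PySem.List.sorted_eq_of_perm_of_pairwise_lt
  · rw [List.perm_ext_iff_of_nodup (List.Nodup.filter _ (by decide))
      (PySem.List.nodup_dedup M)]
    intro a
    simp only [List.mem_filter, PySem.List.mem_dedup, decide_eq_true_eq]
    exact ⟨fun ⟨_, hm⟩ => hm, fun hm => ⟨h a hm, hm⟩⟩
  · exact List.Pairwise.filter _ pvKey_pairwise

-- ===== VERDICT (by name: the statement is the Claim_ definition above) =====
theorem tokenize_raw_position_py_spec : Claim_equal_tokenize_raw_position_py := by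
  intro raw _
  unfold Spec_tokenize_raw_position_py tokenize_raw_position_py tokenize_raw_position_py_alt
  dsimp only
  generalize ((PySem.Str.split? (PySem.Str.upper
      (PySem.Str.replace (PySem.Str.replace raw "/" "-") " " "")) "-").getD []) = toks
  rw [pvA_loop_eq_norm, pvB_loop_eq_set, List.nil_append, pvNorm_filter_empty,
    show (PySem.Set.empty : PySem.Set String) = [] from rfl, ← PySem.Set.ofList_eq_foldl]
  by_cases hN : pvNorm toks = []
  · rw [hN, if_pos rfl]
    decide
  · rw [if_neg hN, pvDedup_loop_eq,
      show (fun code => PySem.Dict.getD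
        ((PySem.List.enumerate pvBaseOrder 0).foldl (fun d p => d.insert p.2 p.1) PySem.Dict.empty)
        code (pvBaseOrder.length : Int)) = pvKey from rfl,
      pvSorted_dedup_eq_filter (pvNorm toks) (fun _ hx => pvNorm_mem_order hx)]
    apply List.filter_congr
    intro c _
    simp [PySem.Set.contains]
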